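-- pv_equiv track=rewrite | github.com/paulsnar/edaemon | application/utility/lesson.py | trim_trailing_nulls
-- ===== SOURCE A (Python) =====
-- def trim_trailing_nulls(lesson_list):
--     new_list = list(lesson_list)
--     for i in reversed(lesson_list):
--         if i is None:
--             new_list.pop(-1)
--         else:
--             break
--     return new_list
-- ===== SOURCE B (Python) =====
-- def trim_trailing_nulls(lesson_list):
--     new_list = list(lesson_list)
--     last = 0
--     for i, x in enumerate(new_list):
--         if x is not None:
--             last = i + 1
--     return new_list[:last]
-- ===== Notes on version B (the rewrite author's own statement) =====
-- stated objective: alternative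
-- what changed: Replaces the backward scan that pops trailing None elements one by one with a single forward pass that tracks the index just past the last non-None element and returns one slice.
import Mathlib
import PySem

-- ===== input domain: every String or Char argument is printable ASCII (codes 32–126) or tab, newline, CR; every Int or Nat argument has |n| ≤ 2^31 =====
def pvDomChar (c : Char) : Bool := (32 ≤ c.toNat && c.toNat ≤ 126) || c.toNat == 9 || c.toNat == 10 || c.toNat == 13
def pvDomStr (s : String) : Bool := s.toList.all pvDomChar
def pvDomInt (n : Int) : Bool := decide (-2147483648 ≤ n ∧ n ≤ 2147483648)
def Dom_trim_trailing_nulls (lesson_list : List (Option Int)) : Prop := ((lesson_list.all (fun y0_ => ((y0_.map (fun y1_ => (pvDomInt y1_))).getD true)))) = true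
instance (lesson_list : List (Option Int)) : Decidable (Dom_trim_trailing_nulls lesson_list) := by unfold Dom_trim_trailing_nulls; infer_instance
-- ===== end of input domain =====

-- B replaces A's backward pop-by-pop scan with a forward pass tracking the cutoff index plus one slice (alternative decomposition, same cost).


-- ===== PORT A =====
-- the 'for i in reversed(lesson_list)' loop: recursion over the reversed list, state = new_list;
-- new_list.pop(-1) on a nonempty list is dropLast (the list is never empty when popped: each pop
-- consumes one reversed element, so new_list always has at least as many elements as remain to scan)
def trimLoopA : List (Option Int) → List (Option Int) → List (Option Int)
  | [], new_list => new_list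
  | i :: rest, new_list =>
    match i with
    | none => trimLoopA rest new_list.dropLast
    | some _ => new_list

def trim_trailing_nulls (lesson_list : List (Option Int)) : List (Option Int) :=
  trimLoopA lesson_list.reverse lesson_list

-- ===== PORT B =====
def trim_trailing_nulls_alt (lesson_list : List (Option Int)) : List (Option Int) :=
  let new_list := lesson_list
  let last : Int :=
    (PySem.List.enumerate new_list 0).foldl
      (fun last p => if p.2.isSome then p.1 + 1 else last) 0
  PySem.List.slice new_list none (some last)

-- ===== PRECONDITION & SPEC =====
def Spec_trim_trailing_nulls (lesson_list : List (Option Int)) (out : List (Option Int)) : Prop := out = trim_trailing_nulls_alt lesson_list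
instance (lesson_list : List (Option Int)) (out : List (Option Int)) : Decidable (Spec_trim_trailing_nulls lesson_list out) := by unfold Spec_trim_trailing_nulls; infer_instance

-- ===== CLAIM (what is proved, stated in full; the proofs are below) =====
def Claim_equal_trim_trailing_nulls : Prop := ∀ (lesson_list : List (Option Int)), Dom_trim_trailing_nulls lesson_list → Spec_trim_trailing_nulls lesson_list (trim_trailing_nulls lesson_list)

-- ===== LEMMAS AND PROOFS =====

-- A's loop, fed the reversed list with the original as state, strips the leading Nones of the reversed list.
theorem trimLoopA_reverse (r : List (Option Int)) :
    trimLoopA r r.reverse = (r.dropWhile Option.isNone).reverse := by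
  induction r with
  | nil => rfl
  | cons x rest ih =>
    cases x with
    | none =>
      simpa [trimLoopA, List.dropLast_concat, List.dropWhile] using ih
    | some a =>
      simp [trimLoopA, List.dropWhile]

def lastF (l : List (Option Int)) : Int :=
  (PySem.List.enumerate l 0).foldl (fun last p => if p.2.isSome then p.1 + 1 else last) 0

theorem lastF_append (l : List (Option Int)) (x : Option Int) :
    lastF (l ++ [x]) = if x.isSome then (l.length : Int) + 1 else lastF l := by
  simp [lastF, PySem.List.enumerate_append, PySem.List.enumerate_cons]

theorem lastF_bounds (l : List (Option Int)) : 0 ≤ lastF l ∧ lastF l ≤ (l.length : Int) := by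
  induction l using List.reverseRecOn with
  | nil => simp [lastF]
  | append_singleton l x ih =>
    rw [lastF_append]
    rcases ih with ⟨h0, h1⟩
    cases x <;> simp <;> omega

theorem lastF_take (l : List (Option Int)) :
    l.take (lastF l).toNat = (l.reverse.dropWhile Option.isNone).reverse := by
  induction l using List.reverseRecOn with
  | nil => simp [lastF]
  | append_singleton l x ih =>
    rw [lastF_append]
    cases x with
    | none =>
      have hb := lastF_bounds l
      rw [if_neg (by simp)]
      have hrev : (l ++ [(none : Option Int)]).reverse = none :: l.reverse := by simp
      rw [hrev]
      have hdw : List.dropWhile Option.isNone ((none : Option Int) :: l.reverse)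
          = List.dropWhile Option.isNone l.reverse := by simp [List.dropWhile]
      rw [hdw, ← ih, List.take_append_of_le_length (by omega)]
    | some a =>
      rw [if_pos (by simp)]
      have h1 : ((l.length : Int) + 1).toNat = l.length + 1 := by omega
      rw [h1, List.take_of_length_le (by simp)]
      simp

-- ===== VERDICT (by name: the statement is the Claim_ definition above) =====
theorem alt_eq_slice (l : List (Option Int)) :
    trim_trailing_nulls_alt l = PySem.List.slice l none (some (lastF l)) := rfl

theorem trim_trailing_nulls_spec : Claim_equal_trim_trailing_nulls := by
  intro l _
  unfold Spec_trim_trailing_nulls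
  have hb := lastF_bounds l
  rw [alt_eq_slice, PySem.List.slice_to _ hb.1, lastF_take]
  show trimLoopA l.reverse l = _
  have := trimLoopA_reverse l.reverse
  simpa using this
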